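-- pv_equiv track=rewrite | github.com/Taylb22/Data_Analysis_SENAI_BOSCH | ETS/Python/Peak/main.py | maior_valor
-- ===== SOURCE A (Python) =====
-- def maior_valor (matriz, linhas, colunas):
--     # O(log C) + O(Log L)
--     low = 0
--     high = colunas - 1
--     col_index = 0
--
--     while low < high:
--         mid = (low + high) // 2
--         if matriz[0][mid] < matriz[0][mid + 1]:
--             low = mid + 1
--         else:
--             high = mid
--
--         col_index = low
--
--     low = 0
--     high = linhas - 1
--     lin_index = 0
--
--     while low < high:
--         mid = (low + high) // 2
--         if matriz[mid][col_index] < matriz[mid + 1][col_index]: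
--             low = mid + 1
--         else:
--             high = mid
--
--         lin_index = low
--
--     return lin_index, col_index
-- ===== SOURCE B (Python) =====
-- def maior_valor(matriz, linhas, colunas):
--     def find_peak(at, lo, hi):
--         if lo >= hi:
--             return lo
--         mid = (lo + hi) // 2
--         if at(mid) < at(mid + 1):
--             return find_peak(at, mid + 1, hi)
--         return find_peak(at, lo, mid)
--
--     col_index = find_peak(lambda j: matriz[0][j], 0, colunas - 1)
--     lin_index = find_peak(lambda i: matriz[i][col_index], 0, linhas - 1)
--     return lin_index, col_index
-- ===== Notes on version B (the rewrite author's own statement) =====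
-- stated objective: simpler
-- what changed: Replaced the two hand-rolled iterative while-loop binary searches (with mutable low/high/col_index state) by one generic recursive find_peak helper applied first along row 0 and then along the found column.
-- outside the precondition, e.g. on maior_valor([[2, 1], [5]], 2, 2): A returns (1, 0), B returns (1, 0)
import Mathlib
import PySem

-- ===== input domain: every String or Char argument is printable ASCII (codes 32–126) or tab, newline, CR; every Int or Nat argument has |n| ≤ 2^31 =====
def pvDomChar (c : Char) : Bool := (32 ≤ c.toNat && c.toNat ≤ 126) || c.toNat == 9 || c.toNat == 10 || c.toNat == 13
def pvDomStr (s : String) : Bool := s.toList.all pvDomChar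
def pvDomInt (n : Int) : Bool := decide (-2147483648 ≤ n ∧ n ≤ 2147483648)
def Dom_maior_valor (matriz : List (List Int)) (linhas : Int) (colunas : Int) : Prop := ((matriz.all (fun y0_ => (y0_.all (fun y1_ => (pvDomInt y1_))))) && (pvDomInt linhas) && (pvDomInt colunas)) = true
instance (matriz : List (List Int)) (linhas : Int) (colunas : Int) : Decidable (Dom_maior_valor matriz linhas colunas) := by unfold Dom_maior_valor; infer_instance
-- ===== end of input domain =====

-- B replaces A's two iterative binary-search while-loops by one generic recursive
-- find_peak helper applied along each axis (objective: simpler).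
-- Both loops halve high - low each step, so fuel = (high - low).toNat bounds the
-- iteration count exactly; the fuel argument is only a structural totality guard.

-- matriz[i][j]; pyGet? is none only on IndexError inputs, which Pre_ excludes, so getD 0 is never taken inside Pre_
def pvAt (matriz : List (List Int)) (i j : Int) : Int :=
  (PySem.List.pyGet? ((PySem.List.pyGet? matriz i).getD []) j).getD 0

-- ===== PORT A =====
-- first while-loop of A: state (low, high, col_index); returns the final col_index
def mvLoop1 (matriz : List (List Int)) (fuel : Nat) (low high col_index : Int) : Int :=
  match fuel with
  | 0 => col_index
  | fuel + 1 =>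
    if low < high then
      let mid := PySem.Int.floordiv (low + high) 2
      if pvAt matriz 0 mid < pvAt matriz 0 (mid + 1) then
        mvLoop1 matriz fuel (mid + 1) high (mid + 1)
      else
        mvLoop1 matriz fuel low mid low
    else col_index

-- second while-loop of A: state (low, high, lin_index); returns the final lin_index
def mvLoop2 (matriz : List (List Int)) (col_index : Int) (fuel : Nat) (low high lin_index : Int) : Int :=
  match fuel with
  | 0 => lin_index
  | fuel + 1 =>
    if low < high then
      let mid := PySem.Int.floordiv (low + high) 2
      if pvAt matriz mid col_index < pvAt matriz (mid + 1) col_index then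
        mvLoop2 matriz col_index fuel (mid + 1) high (mid + 1)
      else
        mvLoop2 matriz col_index fuel low mid low
    else lin_index

def maior_valor (matriz : List (List Int)) (linhas : Int) (colunas : Int) : Int × Int :=
  let col_index := mvLoop1 matriz (colunas - 1 - 0).toNat 0 (colunas - 1) 0
  let lin_index := mvLoop2 matriz col_index (linhas - 1 - 0).toNat 0 (linhas - 1) 0
  (lin_index, col_index)

-- ===== PORT B =====
def findPeak (at_ : Int → Int) (fuel : Nat) (lo hi : Int) : Int :=
  match fuel with
  | 0 => lo
  | fuel + 1 =>
    if lo ≥ hi then lo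
    else
      let mid := PySem.Int.floordiv (lo + hi) 2
      if at_ mid < at_ (mid + 1) then findPeak at_ fuel (mid + 1) hi
      else findPeak at_ fuel lo mid

def maior_valor_alt (matriz : List (List Int)) (linhas : Int) (colunas : Int) : Int × Int :=
  let col_index := findPeak (fun j => pvAt matriz 0 j) (colunas - 1 - 0).toNat 0 (colunas - 1)
  let lin_index := findPeak (fun i => pvAt matriz i col_index) (linhas - 1 - 0).toNat 0 (linhas - 1)
  (lin_index, col_index)

-- ===== PRECONDITION & SPEC =====
-- Pre_ excludes inputs where A raises IndexError (missing rows/entries); it is the natural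
-- well-formed-matrix domain and is slightly narrow: it also excludes some ragged matrices on
-- which A's binary-search probe path happens to miss the gaps and A still returns.
def Pre_maior_valor (matriz : List (List Int)) (linhas : Int) (colunas : Int) : Prop :=
  (2 ≤ colunas → matriz ≠ [] ∧ colunas ≤ ((matriz.headD []).length : Int)) ∧
  (2 ≤ linhas → linhas ≤ (matriz.length : Int) ∧
    ∀ row ∈ matriz.take linhas.toNat, max 1 colunas ≤ ((row.length : Int)))
instance (matriz : List (List Int)) (linhas : Int) (colunas : Int) : Decidable (Pre_maior_valor matriz linhas colunas) := by unfold Pre_maior_valor; infer_instance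

def pvWitness_maior_valor : List (List Int) × Int × Int := ([[1, 3, 2], [4, 5, 6]], 2, 3)

def Spec_maior_valor (matriz : List (List Int)) (linhas : Int) (colunas : Int) (out : Int × Int) : Prop := out = maior_valor_alt matriz linhas colunas
instance (matriz : List (List Int)) (linhas : Int) (colunas : Int) (out : Int × Int) : Decidable (Spec_maior_valor matriz linhas colunas out) := by unfold Spec_maior_valor; infer_instance

-- ===== CLAIM (what is proved, stated in full; the proofs are below) =====
def Claim_equal_maior_valor : Prop := ∀ (matriz : List (List Int)) (linhas : Int) (colunas : Int), Dom_maior_valor matriz linhas colunas → Pre_maior_valor matriz linhas colunas → Spec_maior_valor matriz linhas colunas (maior_valor matriz linhas colunas)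

-- ===== LEMMAS AND PROOFS =====
-- invariant: A's col_index state equals low on every loop entry, so mvLoop1 with
-- col_index = low computes exactly findPeak (both consume the same fuel)
theorem loop1_eq (matriz : List (List Int)) (fuel : Nat) :
    ∀ low high : Int, mvLoop1 matriz fuel low high low = findPeak (fun j => pvAt matriz 0 j) fuel low high := by
  induction fuel with
  | zero => intro low high; rfl
  | succ n ih =>
    intro low high
    rw [mvLoop1, findPeak]
    by_cases h : low < high
    · simp only [if_pos h, if_neg (by omega : ¬ low ≥ high)]
      split_ifs
      · exact ih _ high
      · exact ih low _
    · simp only [if_neg h, if_pos (by omega : low ≥ high)]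

theorem loop2_eq (matriz : List (List Int)) (c : Int) (fuel : Nat) :
    ∀ low high : Int, mvLoop2 matriz c fuel low high low = findPeak (fun i => pvAt matriz i c) fuel low high := by
  induction fuel with
  | zero => intro low high; rfl
  | succ n ih =>
    intro low high
    rw [mvLoop2, findPeak]
    by_cases h : low < high
    · simp only [if_pos h, if_neg (by omega : ¬ low ≥ high)]
      split_ifs
      · exact ih _ high
      · exact ih low _
    · simp only [if_neg h, if_pos (by omega : low ≥ high)]

-- ===== VERDICT (by name: the statement is the Claim_ definition above) =====
theorem maior_valor_spec : Claim_equal_maior_valor := by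
  intro matriz linhas colunas _ _
  unfold Spec_maior_valor maior_valor maior_valor_alt
  simp only [loop1_eq, loop2_eq]
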